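-- pv_equiv track=rewrite | github.com/sidekick5226/ASTERIX_COT_FLASK_2.0 | track_integrator.py | _determine_track_type
-- ===== SOURCE A (Python) =====
-- def _determine_track_type(track_type: str, track_id: str) -> str:
--     """
--     Determine the track type based on available information
--
--     Args:
--         track_type: Original track type from database
--         track_id: Track identifier
--
--     Returns:
--         Standardized track type
--     """
--     if not track_type or track_type == 'unknown':
--         # Try to determine from track ID patterns
--         if track_id.startswith('ADS-B'):
--             return 'aircraft'
--         elif track_id.startswith('RADAR'):
--             return 'radar_target'
--         elif track_id.startswith('MLAT'):
--             return 'multilateration'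
--         elif any(char.isalpha() for char in track_id):
--             # If contains letters, likely an aircraft callsign
--             return 'aircraft'
--         else:
--             return 'unknown'
--
--     # Normalize existing track types
--     track_type_lower = track_type.lower()
--
--     if track_type_lower in ['aircraft', 'airplane', 'plane']:
--         return 'aircraft'
--     elif track_type_lower in ['helicopter', 'heli']:
--         return 'helicopter'
--     elif track_type_lower in ['vehicle', 'ground', 'car', 'truck']:
--         return 'ground_vehicle'
--     elif track_type_lower in ['ship', 'boat', 'vessel']:
--         return 'marine'
--     elif track_type_lower in ['radar', 'primary']:
--         return 'radar_target'
--     elif track_type_lower in ['ads-b', 'adsb']: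
--         return 'aircraft'
--     else:
--         return track_type_lower
-- ===== SOURCE B (Python) =====
-- # B: a table-driven recursive rule interpreter; the classification logic lives
-- # in two ordered rule tables evaluated by one generic recursive evaluator.
--
-- _ID_RULES = (
--     ('prefix', 'ADS-B', 'aircraft'),
--     ('prefix', 'RADAR', 'radar_target'),
--     ('prefix', 'MLAT', 'multilateration'),
--     ('alpha', 'aircraft'),
--     ('const', 'unknown'),
-- )
--
-- _TYPE_RULES = (
--     ('exact', 'aircraft', 'aircraft'), ('exact', 'airplane', 'aircraft'),
--     ('exact', 'plane', 'aircraft'),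
--     ('exact', 'helicopter', 'helicopter'), ('exact', 'heli', 'helicopter'),
--     ('exact', 'vehicle', 'ground_vehicle'), ('exact', 'ground', 'ground_vehicle'),
--     ('exact', 'car', 'ground_vehicle'), ('exact', 'truck', 'ground_vehicle'),
--     ('exact', 'ship', 'marine'), ('exact', 'boat', 'marine'),
--     ('exact', 'vessel', 'marine'),
--     ('exact', 'radar', 'radar_target'), ('exact', 'primary', 'radar_target'),
--     ('exact', 'ads-b', 'aircraft'), ('exact', 'adsb', 'aircraft'),
--     ('identity',),
-- )
--
--
-- def _eval_rules(rules, key):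
--     """Recursively evaluate an ordered rule list against a key string."""
--     if not rules:
--         return key
--     rule, rest = rules[0], rules[1:]
--     kind = rule[0]
--     if kind == 'prefix':
--         return rule[2] if key.startswith(rule[1]) else _eval_rules(rest, key)
--     if kind == 'exact':
--         return rule[2] if key == rule[1] else _eval_rules(rest, key)
--     if kind == 'alpha':
--         return rule[1] if any(c.isalpha() for c in key) else _eval_rules(rest, key)
--     if kind == 'const':
--         return rule[1]
--     return key  # 'identity'
--
--
-- def _determine_track_type(track_type: str, track_id: str) -> str:
--     if not track_type or track_type == 'unknown':
--         return _eval_rules(_ID_RULES, track_id)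
--     return _eval_rules(_TYPE_RULES, track_type.lower())
-- ===== Notes on version B (the rewrite author's own statement) =====
-- stated objective: alternative
-- what changed: A's hard-coded guard/elif control flow is replaced by a generic recursive rule interpreter over two ordered declarative rule tables (prefix/exact/alpha/const/identity rules), so all classification logic is data and one evaluator.
import Mathlib
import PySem

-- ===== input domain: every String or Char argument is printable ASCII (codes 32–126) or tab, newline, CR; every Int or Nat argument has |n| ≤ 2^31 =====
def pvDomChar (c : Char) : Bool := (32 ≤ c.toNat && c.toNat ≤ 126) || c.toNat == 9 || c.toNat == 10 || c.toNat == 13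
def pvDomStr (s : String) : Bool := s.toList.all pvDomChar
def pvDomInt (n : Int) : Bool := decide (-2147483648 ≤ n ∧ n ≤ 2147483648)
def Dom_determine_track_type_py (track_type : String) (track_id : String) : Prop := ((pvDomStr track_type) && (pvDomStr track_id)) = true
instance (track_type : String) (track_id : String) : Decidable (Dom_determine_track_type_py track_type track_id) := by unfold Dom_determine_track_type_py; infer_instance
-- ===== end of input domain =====

-- B replaces A's hard-coded guard/elif control flow by a generic recursive rule interpreter over two ordered rule tables (alternative decomposition; same cost).


-- ===== PORT A =====
def determine_track_type_py (track_type : String) (track_id : String) : String :=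
  if track_type = "" ∨ track_type = "unknown" then
    if PySem.Str.startswith track_id "ADS-B" then "aircraft"
    else if PySem.Str.startswith track_id "RADAR" then "radar_target"
    else if PySem.Str.startswith track_id "MLAT" then "multilateration"
    else if track_id.toList.any PySem.Chars.isalpha then "aircraft"
    else "unknown"
  else
    let l := PySem.Str.lower track_type
    if l ∈ ["aircraft", "airplane", "plane"] then "aircraft"
    else if l ∈ ["helicopter", "heli"] then "helicopter"
    else if l ∈ ["vehicle", "ground", "car", "truck"] then "ground_vehicle"
    else if l ∈ ["ship", "boat", "vessel"] then "marine"
    else if l ∈ ["radar", "primary"] then "radar_target"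
    else if l ∈ ["ads-b", "adsb"] then "aircraft"
    else l

-- ===== PORT B =====
-- the rule DSL of Source B: ('prefix',p,c) / ('exact',s,c) / ('alpha',c) / ('const',c) / ('identity',)
inductive PvRule where
  | prefixR (p c : String)
  | exactR (s c : String)
  | alphaR (c : String)
  | constR (c : String)
  | identR
deriving DecidableEq, Repr

def pvIdRules : List PvRule :=
  [.prefixR "ADS-B" "aircraft", .prefixR "RADAR" "radar_target",
   .prefixR "MLAT" "multilateration", .alphaR "aircraft", .constR "unknown"]

def pvTypeRules : List PvRule :=
  [.exactR "aircraft" "aircraft", .exactR "airplane" "aircraft",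
   .exactR "plane" "aircraft",
   .exactR "helicopter" "helicopter", .exactR "heli" "helicopter",
   .exactR "vehicle" "ground_vehicle", .exactR "ground" "ground_vehicle",
   .exactR "car" "ground_vehicle", .exactR "truck" "ground_vehicle",
   .exactR "ship" "marine", .exactR "boat" "marine", .exactR "vessel" "marine",
   .exactR "radar" "radar_target", .exactR "primary" "radar_target",
   .exactR "ads-b" "aircraft", .exactR "adsb" "aircraft",
   .identR]

-- Source B's _eval_rules: recursive evaluation of an ordered rule list against a key
def pvEvalRules : List PvRule → String → String
  | [], key => key
  | r :: rest, key =>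
    match r with
    | .prefixR p c => if PySem.Str.startswith key p then c else pvEvalRules rest key
    | .exactR s c => if key = s then c else pvEvalRules rest key
    | .alphaR c => if key.toList.any PySem.Chars.isalpha then c else pvEvalRules rest key
    | .constR c => c
    | .identR => key

def determine_track_type_py_alt (track_type : String) (track_id : String) : String :=
  if track_type = "" ∨ track_type = "unknown" then
    pvEvalRules pvIdRules track_id
  else
    pvEvalRules pvTypeRules (PySem.Str.lower track_type)

-- ===== PRECONDITION & SPEC =====
def Spec_determine_track_type_py (track_type : String) (track_id : String) (out : String) : Prop := out = determine_track_type_py_alt track_type track_id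
instance (track_type : String) (track_id : String) (out : String) : Decidable (Spec_determine_track_type_py track_type track_id out) := by unfold Spec_determine_track_type_py; infer_instance

-- ===== CLAIM (what is proved, stated in full; the proofs are below) =====
def Claim_equal_determine_track_type_py : Prop := ∀ (track_type : String) (track_id : String), Dom_determine_track_type_py track_type track_id → Spec_determine_track_type_py track_type track_id (determine_track_type_py track_type track_id)

-- ===== LEMMAS AND PROOFS =====

-- evaluating the type-rule table is A's membership if-chain
theorem pvEvalRules_type (l : String) :
    pvEvalRules pvTypeRules l =
      (if l ∈ ["aircraft", "airplane", "plane"] then "aircraft"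
       else if l ∈ ["helicopter", "heli"] then "helicopter"
       else if l ∈ ["vehicle", "ground", "car", "truck"] then "ground_vehicle"
       else if l ∈ ["ship", "boat", "vessel"] then "marine"
       else if l ∈ ["radar", "primary"] then "radar_target"
       else if l ∈ ["ads-b", "adsb"] then "aircraft"
       else l) := by
  by_cases h : l ∈ (["aircraft", "airplane", "plane", "helicopter", "heli",
      "vehicle", "ground", "car", "truck", "ship", "boat", "vessel",
      "radar", "primary", "ads-b", "adsb"] : List String)
  · simp only [List.mem_cons, List.not_mem_nil, or_false] at h
    rcases h with h|h|h|h|h|h|h|h|h|h|h|h|h|h|h|h <;> subst h <;> decide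
  · simp only [List.mem_cons, List.not_mem_nil, or_false, not_or] at h
    obtain ⟨h1,h2,h3,h4,h5,h6,h7,h8,h9,h10,h11,h12,h13,h14,h15,h16⟩ := h
    simp [pvTypeRules, pvEvalRules,
      h1, h2, h3, h4, h5, h6, h7, h8, h9, h10, h11, h12, h13, h14, h15, h16]

-- evaluating the id-rule table is A's prefix/alpha chain
theorem pvEvalRules_id (track_id : String) :
    pvEvalRules pvIdRules track_id =
      (if PySem.Str.startswith track_id "ADS-B" then "aircraft"
       else if PySem.Str.startswith track_id "RADAR" then "radar_target"
       else if PySem.Str.startswith track_id "MLAT" then "multilateration"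
       else if track_id.toList.any PySem.Chars.isalpha then "aircraft"
       else "unknown") := by
  simp only [pvIdRules, pvEvalRules]

-- ===== VERDICT (by name: the statement is the Claim_ definition above) =====
theorem determine_track_type_py_spec : Claim_equal_determine_track_type_py := by
  intro track_type track_id _
  unfold Spec_determine_track_type_py determine_track_type_py determine_track_type_py_alt
  by_cases hg : track_type = "" ∨ track_type = "unknown"
  · simp only [hg, if_true, pvEvalRules_id]
  · simp only [hg, if_false, pvEvalRules_type]
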